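-- pv_equiv track=rewrite | github.com/hajikhansahito110786/todoconsoleproject2 | backend/src/agents/todo_agent.py | _determine_action
-- ===== SOURCE A (Python) =====
-- from typing import Dict, Any, Optional
--
-- def _determine_action(message: str) -> Optional[str]:
--     """
--     Determine which action to take based on the user's message
--
--     Args:
--         message: The user's message
--
--     Returns:
--         The action to take (e.g., "add_task", "list_tasks", etc.) or None
--     """
--     message_lower = message.lower()
--
--     # Simple keyword matching for demonstration
--     # In a real implementation, this would use more sophisticated NLP
--     if any(word in message_lower for word in ["add", "create", "new", "remember"]):
--         return "add_task"
--     elif any(word in message_lower for word in ["show", "list", "see", "my tasks"]):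
--         return "list_tasks"
--     elif any(word in message_lower for word in ["done", "complete", "finish", "completed"]):
--         return "complete_task"
--     elif any(word in message_lower for word in ["delete", "remove", "cancel"]):
--         return "delete_task"
--     elif any(word in message_lower for word in ["change", "update", "rename", "modify"]):
--         return "update_task"
--
--     return None
-- ===== SOURCE B (Python) =====
-- from typing import Optional
--
-- # Flat prioritized keyword table: earlier index = higher priority.
-- _KEYWORDS = [
--     ("add", "add_task"), ("create", "add_task"), ("new", "add_task"), ("remember", "add_task"),
--     ("show", "list_tasks"), ("list", "list_tasks"), ("see", "list_tasks"), ("my tasks", "list_tasks"),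
--     ("done", "complete_task"), ("complete", "complete_task"), ("finish", "complete_task"), ("completed", "complete_task"),
--     ("delete", "delete_task"), ("remove", "delete_task"), ("cancel", "delete_task"),
--     ("change", "update_task"), ("update", "update_task"), ("rename", "update_task"), ("modify", "update_task"),
-- ]
--
-- def _determine_action(message: str) -> Optional[str]:
--     message_lower = message.lower()
--     hits = [i for i, (kw, _) in enumerate(_KEYWORDS) if kw in message_lower]
--     return _KEYWORDS[min(hits)][1] if hits else None
-- ===== Notes on version B (the rewrite author's own statement) =====
-- stated objective: alternative
-- what changed: B flattens the five keyword groups into one prioritized (keyword, action) table, collects ALL matching keyword indices in a complete scan, and returns the action at the minimum-priority hit, instead of A's ordered early-return if/elif ladder over grouped any() checks.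
import Mathlib
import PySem

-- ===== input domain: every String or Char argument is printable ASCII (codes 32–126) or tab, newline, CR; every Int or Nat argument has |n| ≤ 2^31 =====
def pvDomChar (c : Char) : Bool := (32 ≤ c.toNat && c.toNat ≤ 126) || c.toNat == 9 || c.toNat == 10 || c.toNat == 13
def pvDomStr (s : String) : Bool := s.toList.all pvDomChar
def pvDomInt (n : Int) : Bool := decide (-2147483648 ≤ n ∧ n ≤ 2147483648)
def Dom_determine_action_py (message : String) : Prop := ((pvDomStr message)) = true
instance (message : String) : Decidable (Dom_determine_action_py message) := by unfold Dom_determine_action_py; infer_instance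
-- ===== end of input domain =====

-- B replaces A's ordered if/elif early-return ladder by a complete scan of a flat prioritized keyword table:
-- it collects ALL matching keyword indices and returns the action of the minimum-priority hit (alternative, same cost).


-- ===== PORT A =====
def determine_action_py (message : String) : Option String :=
  let message_lower := PySem.Str.lower message
  if (["add", "create", "new", "remember"].any (fun word => PySem.Str.isIn word message_lower)) then
    some "add_task"
  else if (["show", "list", "see", "my tasks"].any (fun word => PySem.Str.isIn word message_lower)) then
    some "list_tasks"
  else if (["done", "complete", "finish", "completed"].any (fun word => PySem.Str.isIn word message_lower)) then
    some "complete_task"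
  else if (["delete", "remove", "cancel"].any (fun word => PySem.Str.isIn word message_lower)) then
    some "delete_task"
  else if (["change", "update", "rename", "modify"].any (fun word => PySem.Str.isIn word message_lower)) then
    some "update_task"
  else
    none

-- ===== PORT B =====
-- the flat prioritized keyword table of Source B (earlier index = higher priority)
def pvKeywords : List (String × String) :=
  [("add", "add_task"), ("create", "add_task"), ("new", "add_task"), ("remember", "add_task"),
   ("show", "list_tasks"), ("list", "list_tasks"), ("see", "list_tasks"), ("my tasks", "list_tasks"),
   ("done", "complete_task"), ("complete", "complete_task"), ("finish", "complete_task"), ("completed", "complete_task"),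
   ("delete", "delete_task"), ("remove", "delete_task"), ("cancel", "delete_task"),
   ("change", "update_task"), ("update", "update_task"), ("rename", "update_task"), ("modify", "update_task")]

-- transliteration of Source B: hits = [i for i,(kw,_) in enumerate(_KEYWORDS) if kw in m];
-- return _KEYWORDS[min(hits)][1] if hits else None  (the pyGet? none branch is Python's
-- IndexError and is unreachable: min(hits) is always a valid index)
def determine_action_py_alt (message : String) : Option String :=
  let message_lower := PySem.Str.lower message
  let hits : List Int :=
    ((PySem.List.enumerate pvKeywords 0).filter
      (fun ip => PySem.Str.isIn ip.2.1 message_lower)).map (·.1)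
  match PySem.List.min? hits (fun x => x) with
  | none => none
  | some i => (PySem.List.pyGet? pvKeywords i).map (·.2)

-- ===== PRECONDITION & SPEC =====
def Spec_determine_action_py (message : String) (out : Option String) : Prop := out = determine_action_py_alt message
instance (message : String) (out : Option String) : Decidable (Spec_determine_action_py message out) := by unfold Spec_determine_action_py; infer_instance

-- ===== CLAIM (what is proved, stated in full; the proofs are below) =====
def Claim_equal_determine_action_py : Prop := ∀ (message : String), Dom_determine_action_py message → Spec_determine_action_py message (determine_action_py message)

-- ===== LEMMAS AND PROOFS =====

-- first-match over a flat (keyword, action) list: the common reference shape of both programs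
def pvFlatFind (q : String → Bool) : List (String × String) → Option String
  | [] => none
  | p :: t => if q p.1 then some p.2 else pvFlatFind q t

-- index (counting from s) of the first pair whose keyword satisfies q
def pvFindIdxFrom (q : String → Bool) : List (String × String) → Int → Option Int
  | [], _ => none
  | p :: t, s => if q p.1 then some s else pvFindIdxFrom q t (s + 1)

theorem pvFoldlMin_const (xs : List Int) (a : Int) (h : ∀ x ∈ xs, a ≤ x) :
    xs.foldl min a = a := by
  induction xs with
  | nil => rfl
  | cons x t ih =>
      simp only [List.foldl_cons]
      rw [min_eq_left (h x (by simp))]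
      exact ih (fun y hy => h y (by simp [hy]))

theorem pvHits_lb (q : String → Bool) (l : List (String × String)) (s : Int) :
    ∀ i ∈ ((PySem.List.enumerate l s).filter (fun ip => q ip.2.1)).map (·.1), s ≤ i := by
  intro i hi
  rcases List.mem_map.1 hi with ⟨p, hp, rfl⟩
  rcases (PySem.List.mem_enumerate_iff _ _ _).1 (List.mem_of_mem_filter hp) with ⟨k, hk, rfl⟩
  simp

theorem pvMinHits (q : String → Bool) (l : List (String × String)) (s : Int) :
    PySem.List.min? (((PySem.List.enumerate l s).filter (fun ip => q ip.2.1)).map (·.1)) (fun x => x)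
      = pvFindIdxFrom q l s := by
  induction l generalizing s with
  | nil => rfl
  | cons p t ih =>
      rw [PySem.List.enumerate_cons]
      by_cases hq : q p.1
      · simp only [List.filter_cons, hq, if_pos, List.map_cons, pvFindIdxFrom]
        rw [PySem.List.min?_id_cons,
            pvFoldlMin_const _ _ (fun x hx => le_trans (by omega) (pvHits_lb q t (s + 1) x hx))]
      · simp only [List.filter_cons, hq, pvFindIdxFrom, if_neg, Bool.false_eq_true,
          not_false_iff]
        exact ih (s + 1)

theorem pvLookupFind (q : String → Bool) (l : List (String × String)) :
    ∀ pre : List (String × String),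
      (match pvFindIdxFrom q l (pre.length : Int) with
       | none => none
       | some i => (PySem.List.pyGet? (pre ++ l) i).map (·.2)) = pvFlatFind q l := by
  induction l with
  | nil => intro pre; rfl
  | cons p t ih =>
      intro pre
      by_cases hq : q p.1
      · simp only [pvFindIdxFrom, hq, if_pos, pvFlatFind]
        rw [PySem.List.pyGet?_append_length]
        simp
      · simp only [pvFindIdxFrom, hq, Bool.false_eq_true, not_false_iff, if_neg, pvFlatFind]
        have h1 : (pre.length : Int) + 1 = ((pre ++ [p]).length : Int) := by
          simp
        have h2 : pre ++ p :: t = (pre ++ [p]) ++ t := by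
          simp
        rw [h1, h2]
        exact ih (pre ++ [p])

theorem pvAlt_eq_flatFind (message : String) :
    determine_action_py_alt message
      = pvFlatFind (fun kw => PySem.Str.isIn kw (PySem.Str.lower message)) pvKeywords := by
  have h : determine_action_py_alt message =
      (match PySem.List.min? (((PySem.List.enumerate pvKeywords 0).filter
          (fun ip => PySem.Str.isIn ip.2.1 (PySem.Str.lower message))).map (·.1)) (fun x => x) with
       | none => none
       | some i => (PySem.List.pyGet? pvKeywords i).map (·.2)) := rfl
  rw [h, pvMinHits (fun kw => PySem.Str.isIn kw (PySem.Str.lower message)) pvKeywords 0]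
  have h0 := pvLookupFind (fun kw => PySem.Str.isIn kw (PySem.Str.lower message)) pvKeywords []
  simpa using h0

theorem pvGroup (q : String → Bool) (g rest : List (String × String)) (a : String)
    (h : ∀ p ∈ g, p.2 = a) :
    pvFlatFind q (g ++ rest)
      = if g.any (fun p => q p.1) then some a else pvFlatFind q rest := by
  induction g with
  | nil => simp
  | cons p t ih =>
      simp only [List.cons_append, pvFlatFind, List.any_cons]
      by_cases hq : q p.1
      · simp [hq, h p (by simp)]
      · simp only [hq, Bool.false_eq_true, not_false_iff, if_neg, Bool.false_or]
        exact ih (fun x hx => h x (by simp [hx]))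

theorem pvA_eq_flatFind (message : String) :
    determine_action_py message
      = pvFlatFind (fun kw => PySem.Str.isIn kw (PySem.Str.lower message)) pvKeywords := by
  unfold determine_action_py
  set q : String → Bool := fun kw => PySem.Str.isIn kw (PySem.Str.lower message) with hqdef
  have hsplit : pvKeywords
      = [("add", "add_task"), ("create", "add_task"), ("new", "add_task"), ("remember", "add_task")]
        ++ ([("show", "list_tasks"), ("list", "list_tasks"), ("see", "list_tasks"), ("my tasks", "list_tasks")]
        ++ ([("done", "complete_task"), ("complete", "complete_task"), ("finish", "complete_task"), ("completed", "complete_task")]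
        ++ ([("delete", "delete_task"), ("remove", "delete_task"), ("cancel", "delete_task")]
        ++ ([("change", "update_task"), ("update", "update_task"), ("rename", "update_task"), ("modify", "update_task")]
        ++ [])))) := rfl
  rw [hsplit,
      pvGroup q _ _ "add_task" (by intro p hp; fin_cases hp <;> rfl),
      pvGroup q _ _ "list_tasks" (by intro p hp; fin_cases hp <;> rfl),
      pvGroup q _ _ "complete_task" (by intro p hp; fin_cases hp <;> rfl),
      pvGroup q _ _ "delete_task" (by intro p hp; fin_cases hp <;> rfl),
      pvGroup q _ _ "update_task" (by intro p hp; fin_cases hp <;> rfl)]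
  simp [List.any, pvFlatFind, hqdef]

-- ===== VERDICT (by name: the statement is the Claim_ definition above) =====
theorem determine_action_py_spec : Claim_equal_determine_action_py := by
  intro message _
  unfold Spec_determine_action_py
  rw [pvA_eq_flatFind, pvAlt_eq_flatFind]
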